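-- pv_equiv track=rewrite | github.com/openimagingdata/findingmodel | src/findingmodel/tools/ontology_search.py | normalize_concept
-- ===== SOURCE A (Python) =====
-- def normalize_concept(text: str) -> str:
--     """
--     Normalize concept text for deduplication by removing semantic tags and trailing parenthetical content.
--
--     Args:
--         text: Original concept text
--
--     Returns:
--         Normalized text for comparison
--     """
--     # Take only the first line if multi-line
--     normalized = text.split("\n")[0]
--
--     # Remove everything after colon (common in RadLex results like "berry aneurysm: description...")
--     if ":" in normalized:
--         normalized = normalized.split(":")[0]
--
--     # Remove TRAILING parenthetical content only (e.g., "Liver (organ)" -> "Liver")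
--     # But preserve middle parenthetical content (e.g., "Calcium (2+) level" stays as is)
--     normalized = normalized.strip()
--
--     # Check if string ends with parentheses
--     if normalized.endswith(")"):
--         # Find the matching opening parenthesis for the trailing group
--         paren_count = 0
--         start_pos = -1
--
--         # Work backwards from the end
--         for i in range(len(normalized) - 1, -1, -1):
--             if normalized[i] == ")":
--                 paren_count += 1
--             elif normalized[i] == "(":
--                 paren_count -= 1
--                 if paren_count == 0:
--                     start_pos = i
--                     break
--
--         # If we found a matching opening parenthesis, check if it's trailing
--         # (i.e., only whitespace between the opening paren and what comes before)
--         if start_pos > 0: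
--             # Get text before the parenthesis
--             before_paren = normalized[:start_pos].rstrip()
--             # If there's text before and it doesn't end with another closing paren,
--             # this is a trailing parenthetical expression
--             if before_paren and not before_paren.endswith(")"):
--                 normalized = before_paren
--
--     # Normalize whitespace (but preserve case)
--     normalized = " ".join(normalized.split())
--
--     return normalized
-- ===== SOURCE B (Python) =====
-- def normalize_concept(text: str) -> str:
--     """
--     Normalize concept text for deduplication by removing semantic tags and trailing parenthetical content.
--
--     Streaming re-implementation: one char loop cuts at the first newline or colon;
--     the trailing-parenthetical opener is found by a single forward scan keeping a
--     nesting-depth counter and the last '(' index seen at each depth; whitespace is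
--     collapsed by one word-building pass instead of split/join chains.
--     """
--     head = []
--     for ch in text:
--         if ch == "\n" or ch == ":":
--             break
--         head.append(ch)
--     s = "".join(head).strip()
--
--     if s.endswith(")"):
--         depth = 0
--         last_open_at = {}
--         for i, ch in enumerate(s):
--             if ch == "(":
--                 last_open_at[depth] = i
--                 depth += 1
--             elif ch == ")":
--                 depth -= 1
--         start = last_open_at.get(depth, -1)
--         if start > 0:
--             before = s[:start].rstrip()
--             if before and not before.endswith(")"):
--                 s = before
--
--     words = []
--     cur = []
--     for ch in s:
--         if ch.isspace():
--             if cur: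
--                 words.append("".join(cur))
--                 cur = []
--         else:
--             cur.append(ch)
--     if cur:
--         words.append("".join(cur))
--     return " ".join(words)
-- ===== Notes on version B (the rewrite author's own statement) =====
-- stated objective: alternative
-- what changed: B streams: a single char loop with break replaces the two split-and-take-head passes, the trailing-parenthetical opener is found by one forward scan keeping a depth counter and the last opener index per depth instead of A's backward paren-counting loop, and whitespace is collapsed by one word-building pass instead of the split/join idiom.
import Mathlib
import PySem

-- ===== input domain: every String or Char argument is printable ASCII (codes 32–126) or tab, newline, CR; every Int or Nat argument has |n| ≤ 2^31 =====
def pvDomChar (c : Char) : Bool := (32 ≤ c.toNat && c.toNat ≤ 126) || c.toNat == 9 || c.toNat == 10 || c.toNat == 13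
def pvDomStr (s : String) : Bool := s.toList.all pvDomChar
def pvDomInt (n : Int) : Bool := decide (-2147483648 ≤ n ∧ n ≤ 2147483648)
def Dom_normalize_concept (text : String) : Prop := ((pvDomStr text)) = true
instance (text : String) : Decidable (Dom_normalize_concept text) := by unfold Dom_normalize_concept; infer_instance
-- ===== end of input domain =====

-- B is a streaming rewrite (objective: alternative, same cost): one char loop with break replaces the
-- two split-and-take-head passes, a forward depth-tracking scan replaces A's backward paren-counting
-- loop, and a word-building pass replaces the split/join whitespace collapse.

-- ===== PORT A =====
-- loop body of A's backward scan: state (paren_count, start_pos, broke)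
def pvLoopA (s : String) (st : Int × Int × Bool) (i : Int) : Int × Int × Bool :=
  if st.2.2 then st  -- 'break' reached: remaining iterations do nothing
  else
    -- normalized[i]: index always in range when A runs this loop; default never used
    let c := (PySem.Str.pyGet? s i).getD ' '
    if c = ')' then (st.1 + 1, st.2.1, false)
    else if c = '(' then
      if st.1 - 1 = 0 then (st.1 - 1, i, true)
      else (st.1 - 1, st.2.1, false)
    else st

-- A's trailing-parenthetical stage: backward scan from the end for the matching '('
def pvTrailA (normalized : String) : String :=
  if PySem.Str.endswith normalized ")" then
    let st := (PySem.List.pyRange (PySem.Str.len normalized - 1) (-1) (-1)).foldl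
                (pvLoopA normalized) (0, -1, false)
    let start_pos := st.2.1
    if start_pos > 0 then
      let before_paren := PySem.Str.rstrip (PySem.Str.slice normalized none (some start_pos))
      if PySem.Str.len before_paren ≠ 0 ∧ PySem.Str.endswith before_paren ")" = false then
        before_paren
      else normalized
    else normalized
  else normalized

def normalize_concept (text : String) : String :=
  let normalized := ((PySem.Str.split? text "\n").getD []).headD ""
  let normalized :=
    if PySem.Str.isIn ":" normalized then ((PySem.Str.split? normalized ":").getD []).headD ""
    else normalized
  let normalized := pvTrailA (PySem.Str.strip normalized)
  PySem.Str.join " " (PySem.Str.split₀ normalized)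

-- ===== PORT B =====
-- B's head loop: collect chars until the first '\n' or ':' ('break')
def pvHead : List Char → List Char
  | [] => []
  | c :: rest => if c = '\n' ∨ c = ':' then [] else c :: pvHead rest

-- loop body of B's forward scan: state (depth, last_open_at)
def pvLoopB (st : Int × PySem.Dict Int Int) (p : Int × Char) : Int × PySem.Dict Int Int :=
  if p.2 = '(' then (st.1 + 1, st.2.insert st.1 p.1)
  else if p.2 = ')' then (st.1 - 1, st.2)
  else st

-- B's trailing-parenthetical stage: one forward scan, last '(' per depth in a dict
def pvTrailB (s : String) : String :=
  if PySem.Str.endswith s ")" then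
    let st := (PySem.List.enumerate s.toList).foldl pvLoopB (0, PySem.Dict.empty)
    let start := st.2.getD st.1 (-1)
    if start > 0 then
      let before := PySem.Str.rstrip (PySem.Str.slice s none (some start))
      if PySem.Str.len before ≠ 0 ∧ PySem.Str.endswith before ")" = false then
        before
      else s
    else s
  else s

-- B's word loop: state (words, cur); whitespace closes the current word
def pvWordStep (st : List (List Char) × List Char) (c : Char) : List (List Char) × List Char :=
  if PySem.Chars.isspace c then
    if st.2.isEmpty then st else (st.1 ++ [st.2], [])
  else (st.1, st.2 ++ [c])

def pvWords (cs : List Char) : List (List Char) :=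
  let st := cs.foldl pvWordStep ([], [])
  if st.2.isEmpty then st.1 else st.1 ++ [st.2]

def normalize_concept_alt (text : String) : String :=
  let s := String.ofList (PySem.Chars.strip (pvHead text.toList))
  let s := pvTrailB s
  String.ofList (PySem.Chars.join [' '] (pvWords s.toList))

-- ===== PRECONDITION & SPEC =====
def Spec_normalize_concept (text : String) (out : String) : Prop := out = normalize_concept_alt text
instance (text : String) (out : String) : Decidable (Spec_normalize_concept text out) := by unfold Spec_normalize_concept; infer_instance

-- ===== CLAIM (what is proved, stated in full; the proofs are below) =====
def Claim_equal_normalize_concept : Prop := ∀ (text : String), Dom_normalize_concept text → Spec_normalize_concept text (normalize_concept text)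

-- ===== LEMMAS AND PROOFS =====

-- A's step, phrased on an (index, char) pair
def pvStep (p : Int × Char) (st : Int × Int × Bool) : Int × Int × Bool :=
  if st.2.2 then st
  else if p.2 = ')' then (st.1 + 1, st.2.1, false)
  else if p.2 = '(' then
    if st.1 - 1 = 0 then (st.1 - 1, p.1, true)
    else (st.1 - 1, st.2.1, false)
  else st

-- closers minus openers
def pvBal : List (Int × Char) → Int
  | [] => 0
  | p :: rest => (if p.2 = ')' then 1 else if p.2 = '(' then -1 else 0) + pvBal rest

-- index where A's backward scan breaks: the LAST '(' whose suffix is balanced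
def pvLastHit? : List (Int × Char) → Option Int
  | [] => none
  | p :: rest =>
    match pvLastHit? rest with
    | some j => some j
    | none => if p.2 = '(' ∧ pvBal rest = 1 then some p.1 else none

-- index of the LAST '(' seen at prefix-depth k, starting from depth d0
def pvLastOpen? : List (Int × Char) → Int → Int → Option Int
  | [], _, _ => none
  | p :: rest, d0, k =>
    if p.2 = '(' then
      match pvLastOpen? rest (d0 + 1) k with
      | some j => some j
      | none => if d0 = k then some p.1 else none
    else if p.2 = ')' then pvLastOpen? rest (d0 - 1) k
    else pvLastOpen? rest d0 k

theorem pvFoldrA_char (ps : List (Int × Char)) :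
    ps.foldr pvStep (0, -1, false) =
      (match pvLastHit? ps with
       | some j => (0, j, true)
       | none => (pvBal ps, -1, false)) := by
  induction ps with
  | nil => simp [pvLastHit?, pvBal]
  | cons p rest ih =>
    simp only [List.foldr_cons, ih]
    rcases h : pvLastHit? rest with _ | j
    · simp only [pvLastHit?, h]
      by_cases hc : p.2 = ')'
      · simp [pvStep, pvBal, hc]; ring
      · by_cases ho : p.2 = '('
        · by_cases hb : pvBal rest = 1
          · simp [pvStep, ho, hb]
          · have hne : ¬(pvBal rest - 1 = 0) := by omega
            simp [pvStep, pvBal, ho, hb, hne, Prod.ext_iff]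
            omega
        · simp [pvStep, pvBal, hc, ho]
    · simp [pvLastHit?, h, pvStep]

theorem pvFoldlB_depth (ps : List (Int × Char)) (d0 : Int) (m : PySem.Dict Int Int) :
    (ps.foldl pvLoopB (d0, m)).1 = d0 - pvBal ps := by
  induction ps generalizing d0 m with
  | nil => simp [pvBal]
  | cons p rest ih =>
    by_cases hc : p.2 = '('
    · simp only [List.foldl_cons, pvLoopB, hc, ih, pvBal]
      simp []
      ring
    · by_cases ho : p.2 = ')'
      · simp only [List.foldl_cons, pvLoopB, ho]
        simp only [if_neg hc, ih, pvBal]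
        simp [ho]
        ring
      · simp only [List.foldl_cons, pvLoopB, if_neg hc, if_neg ho, ih, pvBal]
        simp []

theorem pvFoldlB_get? (ps : List (Int × Char)) (d0 : Int) (m : PySem.Dict Int Int) (k : Int) :
    ((ps.foldl pvLoopB (d0, m)).2).get? k =
      (match pvLastOpen? ps d0 k with
       | some j => some j
       | none => m.get? k) := by
  induction ps generalizing d0 m with
  | nil => simp [pvLastOpen?]
  | cons p rest ih =>
    by_cases hc : p.2 = '('
    · simp only [List.foldl_cons, pvLoopB, hc, ih, pvLastOpen?]
      rcases h : pvLastOpen? rest (d0 + 1) k with _ | j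
      · by_cases hk : d0 = k
        · subst hk; simp [h, PySem.Dict.get?_insert_self]
        · simp [h, hk, PySem.Dict.get?_insert_of_ne _ _ (Ne.symm hk)]
      · simp [h]
    · by_cases ho : p.2 = ')'
      · simp [List.foldl_cons, pvLoopB, ho, ih, pvLastOpen?]
      · simp [List.foldl_cons, pvLoopB, hc, ho, ih, pvLastOpen?]

theorem pvLastOpen_eq_lastHit (ps : List (Int × Char)) (d0 : Int) :
    pvLastOpen? ps d0 (d0 - pvBal ps) = pvLastHit? ps := by
  induction ps generalizing d0 with
  | nil => simp [pvLastOpen?, pvLastHit?]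
  | cons p rest ih =>
    by_cases hc : p.2 = '('
    · have hb : d0 - pvBal (p :: rest) = (d0 + 1) - pvBal rest := by
        simp [pvBal, hc]; ring
      simp only [pvLastOpen?, pvLastHit?, hc, hb, ih]
      rcases h : pvLastHit? rest with _ | j
      · have hiff : (d0 = d0 - pvBal (p :: rest)) ↔ (pvBal rest = 1) := by
          rw [hb]; omega
        rw [← hb]
        by_cases hb1 : pvBal rest = 1
        · simp [hb1, hiff]
        · simp [hb1, hiff]
      · simp
    · by_cases ho : p.2 = ')'
      · have hb : d0 - pvBal (p :: rest) = (d0 - 1) - pvBal rest := by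
          simp [pvBal, ho]; ring
        simp only [pvLastOpen?, pvLastHit?, ho, hb, ih]
        cases pvLastHit? rest <;> simp []
      · have hb : d0 - pvBal (p :: rest) = d0 - pvBal rest := by
          simp [pvBal, ho, hc]
        simp only [pvLastOpen?, pvLastHit?, if_neg hc, if_neg ho, hb, ih]
        cases pvLastHit? rest <;> simp [hc]

-- A's backward fold over range(len-1, -1, -1) equals the foldr of pvStep over enumerate
theorem pvFoldA_eq_foldr (s : String) :
    (PySem.List.pyRange (PySem.Str.len s - 1) (-1) (-1)).foldl (pvLoopA s) (0, -1, false) =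
      (PySem.List.enumerate s.toList).foldr pvStep (0, -1, false) := by
  have h1 : PySem.List.pyRange (PySem.Str.len s - 1) (-1) (-1) =
      (PySem.List.pyRange 0 (PySem.List.len s.toList)).reverse := by
    rw [PySem.List.pyRange_neg_one_eq_reverse, PySem.Str.len_eq, PySem.List.len_eq]
    norm_num
  rw [h1, List.foldl_reverse,
      PySem.List.enumerate_eq_map_pyRange s.toList ' ', List.foldr_map]
  congr 1

-- the two scans find the same opening-paren index
theorem pvStartEq (s : String) :
    ((PySem.List.pyRange (PySem.Str.len s - 1) (-1) (-1)).foldl (pvLoopA s) (0, -1, false)).2.1 =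
      (((PySem.List.enumerate s.toList).foldl pvLoopB (0, PySem.Dict.empty)).2).getD
        ((PySem.List.enumerate s.toList).foldl pvLoopB (0, PySem.Dict.empty)).1 (-1) := by
  rw [pvFoldA_eq_foldr, pvFoldrA_char,
      PySem.Dict.getD_eq_get?_getD, pvFoldlB_get?, pvFoldlB_depth,
      pvLastOpen_eq_lastHit]
  rcases h : pvLastHit? (PySem.List.enumerate s.toList) with _ | j <;>
    simp [PySem.Dict.get?_empty]

theorem pvTrail_eq (s : String) : pvTrailA s = pvTrailB s := by
  simp only [pvTrailA, pvTrailB]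
  rw [pvStartEq s]

-- --- preamble: A's two split-and-take-head passes equal B's break loop ---

theorem pvGoAcc (c₀ : Char) (fuel : Nat) :
    ∀ (l cur a0 : List Char) (as : List (List Char)),
      ∃ r, PySem.Chars.splitOn.go [c₀] fuel l cur (as ++ [a0]) = a0 :: r := by
  induction fuel with
  | zero =>
    intro l cur a0 as
    simp [PySem.Chars.splitOn.go]
  | succ n ih =>
    intro l cur a0 as
    cases l with
    | nil => simp [PySem.Chars.splitOn.go]
    | cons c rest =>
      simp only [PySem.Chars.splitOn.go]
      split
      · have := ih (List.drop 1 (c :: rest)) [] a0 (cur.reverse :: as)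
        simpa using this
      · exact ih _ _ _ _

theorem pvGoHead (c₀ : Char) (fuel : Nat) :
    ∀ (l cur : List Char), l.length < fuel →
      ∃ r, PySem.Chars.splitOn.go [c₀] fuel l cur [] =
        (cur.reverse ++ l.takeWhile (fun c => c ≠ c₀)) :: r := by
  induction fuel with
  | zero => intro l cur h; omega
  | succ n ih =>
    intro l cur h
    cases l with
    | nil => simp [PySem.Chars.splitOn.go]
    | cons c rest =>
      simp only [PySem.Chars.splitOn.go]
      by_cases hc : c = c₀
      · have hp : [c₀].isPrefixOf (c :: rest) = true := by simp [List.isPrefixOf, hc]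
        rw [if_pos hp]
        have := pvGoAcc c₀ n (List.drop [c₀].length (c :: rest)) [] cur.reverse []
        simp only [List.nil_append] at this
        obtain ⟨r, hr⟩ := this
        refine ⟨r, ?_⟩
        rw [hr]
        simp [hc]
      · have hp : [c₀].isPrefixOf (c :: rest) = false := by simp [List.isPrefixOf]; exact Ne.symm hc
        rw [if_neg (by simp [hp])]
        obtain ⟨r, hr⟩ := ih rest (c :: cur) (by simp at h ⊢; omega)
        refine ⟨r, ?_⟩
        rw [hr]
        simp [hc]

theorem pvSplitOnHead (cs : List Char) (c₀ : Char) :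
    ∃ r, PySem.Chars.splitOn cs [c₀] = cs.takeWhile (fun c => c ≠ c₀) :: r := by
  have := pvGoHead c₀ (cs.length + 1) cs [] (by omega)
  simpa [PySem.Chars.splitOn] using this

theorem pvHead_eq_takeWhile (cs : List Char) :
    pvHead cs = (cs.takeWhile (fun c => c ≠ '\n')).takeWhile (fun c => c ≠ ':') := by
  induction cs with
  | nil => simp [pvHead]
  | cons c rest ih =>
    by_cases hn : c = '\n'
    · simp [pvHead, hn]
    · by_cases hk : c = ':'
      · simp [pvHead, hk]
      · simp [pvHead, hn, hk, ih]

theorem pvPreamble_eq (text : String) :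
    PySem.Str.strip
      (if PySem.Str.isIn ":" (((PySem.Str.split? text "\n").getD []).headD "")
       then ((PySem.Str.split? (((PySem.Str.split? text "\n").getD []).headD "") ":").getD []).headD ""
       else ((PySem.Str.split? text "\n").getD []).headD "") =
    String.ofList (PySem.Chars.strip (pvHead text.toList)) := by
  obtain ⟨r1, h1⟩ := pvSplitOnHead text.toList '\n'
  have e1 : ((PySem.Str.split? text "\n").getD []).headD "" =
      String.ofList (text.toList.takeWhile (fun c => c ≠ '\n')) := by
    simp [PySem.Str.split?, PySem.Chars.split?, h1]
  rw [e1, pvHead_eq_takeWhile]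
  generalize text.toList.takeWhile (fun c => c ≠ '\n') = tw at *
  by_cases hin : PySem.Str.isIn ":" (String.ofList tw) = true
  · rw [if_pos hin]
    obtain ⟨r2, h2⟩ := pvSplitOnHead (String.ofList tw).toList ':'
    rw [String.toList_ofList] at h2
    have e2 : ((PySem.Str.split? (String.ofList tw) ":").getD []).headD "" =
        String.ofList (tw.takeWhile (fun c => c ≠ ':')) := by
      simp [PySem.Str.split?, PySem.Chars.split?, String.toList_ofList, h2]
    rw [e2]
    have hx : (PySem.Str.strip (String.ofList (tw.takeWhile (fun c => c ≠ ':')))).toList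
        = PySem.Chars.strip (tw.takeWhile (fun c => c ≠ ':')) := by
      rw [PySem.Str.toList_strip, String.toList_ofList]
    rw [← hx, String.ofList_toList]
  · rw [if_neg hin]
    have hnomem : ':' ∉ tw := by
      intro hmem
      apply hin
      rw [PySem.Str.isIn_iff_infix]
      simp [String.toList_ofList]
      exact List.singleton_infix_iff ':' tw |>.mpr hmem
    have htw : tw.takeWhile (fun c => c ≠ ':') = tw :=
      List.takeWhile_eq_self_iff.mpr (by intro c hc; simp; exact fun h => hnomem (h ▸ hc))
    rw [htw]
    have hx : (PySem.Str.strip (String.ofList tw)).toList = PySem.Chars.strip tw := by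
      rw [PySem.Str.toList_strip, String.toList_ofList]
    rw [← hx, String.ofList_toList]

-- --- final stage: A's split/join whitespace collapse equals B's word-building loop ---

theorem pvGoWords (cs : List Char) :
    ∀ (cur : List Char) (acc : List (List Char)),
      PySem.Chars.split₀.go cs cur acc =
        (let st := cs.foldl pvWordStep (acc.reverse, cur.reverse)
         if st.2.isEmpty then st.1 else st.1 ++ [st.2]) := by
  induction cs with
  | nil =>
    intro cur acc
    by_cases h : cur.isEmpty
    · simp [PySem.Chars.split₀.go, h]
    · simp [PySem.Chars.split₀.go, h]
  | cons c rest ih =>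
    intro cur acc
    by_cases hs : PySem.Chars.isspace c
    · by_cases hc : cur.isEmpty
      · have hc' : cur = [] := by simpa [List.isEmpty_iff] using hc
        simp only [PySem.Chars.split₀.go, hs, hc, if_pos, List.foldl_cons, pvWordStep]
        rw [ih [] acc]
        simp [hc']
      · simp only [PySem.Chars.split₀.go, hs, hc, List.foldl_cons, pvWordStep]
        rw [ih [] (cur.reverse :: acc)]
        have hcr : cur.reverse.isEmpty = false := by
          simp [List.isEmpty_iff] at hc ⊢; exact hc
        simp [hcr]
    · simp only [PySem.Chars.split₀.go, hs, List.foldl_cons, pvWordStep]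
      rw [ih (c :: cur) acc]
      simp
theorem pvWords_eq (cs : List Char) : pvWords cs = PySem.Chars.split₀ cs := by
  rw [PySem.Chars.split₀, pvGoWords]
  simp [pvWords]

theorem pvJoin_eq (s : String) :
    PySem.Str.join " " (PySem.Str.split₀ s) =
      String.ofList (PySem.Chars.join [' '] (pvWords s.toList)) := by
  have hx : (PySem.Str.join " " (PySem.Str.split₀ s)).toList =
      PySem.Chars.join [' '] (pvWords s.toList) := by
    rw [PySem.Str.toList_join, PySem.Str.split₀_map_toList, pvWords_eq]
    rfl
  rw [← hx, String.ofList_toList]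

-- ===== VERDICT (by name: the statement is the Claim_ definition above) =====
theorem normalize_concept_spec : Claim_equal_normalize_concept := by
  intro text _
  unfold Spec_normalize_concept
  simp only [normalize_concept, normalize_concept_alt]
  rw [pvPreamble_eq, pvTrail_eq, pvJoin_eq]
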